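-- pv_equiv track=rewrite | github.com/tomergee/barkland | barkland/engine/matching.py | match_play_partners
-- ===== SOURCE A (Python) =====
-- def match_play_partners(dogs: list[str]) -> tuple[list[tuple[str, str]], list[str]]:
--     """
--     Match dogs in play pairs based on FIFO order.
--     Returns:
--         pairs: A list of tuples (dog1, dog2) representing matched pairs.
--         unmatched: A list of dogs that were not matched.
--     """
--     pairs = []
--     unmatched = []
--     for i in range(0, len(dogs), 2):
--         if i + 1 < len(dogs):
--             pairs.append((dogs[i], dogs[i+1]))
--         else:
--             unmatched.append(dogs[i])
--     return pairs, unmatched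
-- ===== SOURCE B (Python) =====
-- def match_play_partners(dogs: list[str]) -> tuple[list[tuple[str, str]], list[str]]:
--     """Compute all pairs in one shot by zipping the even-index slice with the
--     odd-index slice (zip truncates the longer one); the unmatched list is
--     determined separately by the parity of the length."""
--     pairs = list(zip(dogs[::2], dogs[1::2]))
--     unmatched = [dogs[-1]] if len(dogs) % 2 == 1 else []
--     return pairs, unmatched
-- ===== Notes on version B (the rewrite author's own statement) =====
-- stated objective: idiomatic
-- what changed: Replaces the explicit index loop over range(0, len, 2) with its per-step branch by two staged, loop-free computations: pairs = zip of the stride-2 slices dogs[::2] and dogs[1::2], and unmatched decided by the parity of len(dogs) (the last element iff the length is odd).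
import Mathlib
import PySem

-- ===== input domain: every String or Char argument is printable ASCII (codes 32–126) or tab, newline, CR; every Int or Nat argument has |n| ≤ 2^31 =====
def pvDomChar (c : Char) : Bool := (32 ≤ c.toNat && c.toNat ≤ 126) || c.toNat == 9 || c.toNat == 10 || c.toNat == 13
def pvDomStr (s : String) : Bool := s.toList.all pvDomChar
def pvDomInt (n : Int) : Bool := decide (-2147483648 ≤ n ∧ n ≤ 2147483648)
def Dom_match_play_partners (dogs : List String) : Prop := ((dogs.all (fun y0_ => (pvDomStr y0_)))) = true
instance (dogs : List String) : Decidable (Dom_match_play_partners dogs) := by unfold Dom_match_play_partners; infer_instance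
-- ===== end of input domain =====

-- B replaces A's index loop and per-step branch by two staged loop-free computations: zip of the stride-2 slices and a parity check (idiomatic decomposition, same cost).


-- ===== PORT A =====
-- the body of A's for-loop: pair dogs[i] with dogs[i+1] when i+1 < len(dogs), else record dogs[i] unmatched
def pvStepA (dogs : List String) (st : List (String × String) × List String) (i : Int) :
    List (String × String) × List String :=
  if i + 1 < (dogs.length : Int) then
    (st.1 ++ [(PySem.List.pyGetD dogs i "", PySem.List.pyGetD dogs (i + 1) "")], st.2)
  else
    (st.1, st.2 ++ [PySem.List.pyGetD dogs i ""])

def match_play_partners (dogs : List String) : (List (String × String)) × List String :=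
  (PySem.List.pyRange 0 (dogs.length : Int) 2).foldl (pvStepA dogs) ([], [])

-- ===== PORT B =====
-- pairs = list(zip(dogs[::2], dogs[1::2])); unmatched = [dogs[-1]] if len(dogs) % 2 == 1 else []
-- (slice? with the literal step 2 always returns some, so .getD [] only totalizes it;
--  dogs[-1] is only read under the odd-length guard, where it is in range, so pyGetD is exact)
def match_play_partners_alt (dogs : List String) : (List (String × String)) × List String :=
  let pairs := List.zip ((PySem.List.slice? dogs none none 2).getD [])
                        ((PySem.List.slice? dogs (some 1) none 2).getD [])
  let unmatched := if dogs.length % 2 = 1 then [PySem.List.pyGetD dogs (-1) ""] else []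
  (pairs, unmatched)

-- ===== PRECONDITION & SPEC =====
def Spec_match_play_partners (dogs : List String) (out : (List (String × String)) × List String) : Prop := out = match_play_partners_alt dogs
instance (dogs : List String) (out : (List (String × String)) × List String) : Decidable (Spec_match_play_partners dogs out) := by unfold Spec_match_play_partners; infer_instance

-- ===== CLAIM (what is proved, stated in full; the proofs are below) =====
def Claim_equal_match_play_partners : Prop := ∀ (dogs : List String), Dom_match_play_partners dogs → Spec_match_play_partners dogs (match_play_partners dogs)

-- ===== LEMMAS AND PROOFS =====

-- dogs[::2] in normal form: the elements at even indices, one per k < ceil(len/2)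
lemma slice?_evens {α : Type} (xs : List α) :
    PySem.List.slice? xs none none 2
      = some (List.filterMap (fun k => xs[2 * k]?) (List.range ((xs.length + 1) / 2))) := by
  simp only [PySem.List.slice?, PySem.List.sliceIndices]
  norm_num
  have hc : (if 0 < xs.length then (((xs.length : Int) + 2 - 1) / 2).toNat else 0)
      = (xs.length + 1) / 2 := by split_ifs <;> omega
  rw [hc]
  refine List.filterMap_congr (fun k _ => ?_)
  have h2 : ((2 * (k : Int)).toNat) = 2 * k := by omega
  rw [h2]

-- dogs[1::2] in normal form: the elements at odd indices, one per k < len/2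
lemma slice?_odds {α : Type} (xs : List α) :
    PySem.List.slice? xs (some 1) none 2
      = some (List.filterMap (fun k => xs[2 * k + 1]?) (List.range (xs.length / 2))) := by
  cases xs with
  | nil => simp [PySem.List.slice?, PySem.List.sliceIndices]
  | cons a t =>
    simp only [PySem.List.slice?, PySem.List.sliceIndices]
    norm_num
    have hc : (if 0 < t.length then (((t.length : Int) + 2 - 1) / 2).toNat else 0)
        = (t.length + 1) / 2 := by split_ifs <;> omega
    rw [hc]
    refine List.filterMap_congr (fun k _ => ?_)
    have h2 : ((1 + 2 * (k : Int)).toNat) = 2 * k + 1 := by omega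
    rw [h2]
    simp

lemma evens_cons2 {α : Type} (x y : α) (r : List α) :
    (PySem.List.slice? (x :: y :: r) none none 2).getD []
      = x :: (PySem.List.slice? r none none 2).getD [] := by
  rw [slice?_evens, slice?_evens]
  simp only [Option.getD_some]
  have hl : ((x :: y :: r).length + 1) / 2 = (r.length + 1) / 2 + 1 := by
    simp only [List.length_cons]; omega
  rw [hl, List.range_succ_eq_map, List.filterMap_cons, List.filterMap_map]
  norm_num
  refine List.filterMap_congr (fun k _ => ?_)
  have h2 : 2 * (k + 1) = 2 * k + 1 + 1 := by ring
  simp [h2]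

lemma odds_cons2 {α : Type} (x y : α) (r : List α) :
    (PySem.List.slice? (x :: y :: r) (some 1) none 2).getD []
      = y :: (PySem.List.slice? r (some 1) none 2).getD [] := by
  rw [slice?_odds, slice?_odds]
  simp only [Option.getD_some]
  have hl : (x :: y :: r).length / 2 = r.length / 2 + 1 := by
    simp only [List.length_cons]; omega
  rw [hl, List.range_succ_eq_map, List.filterMap_cons, List.filterMap_map]
  norm_num
  refine List.filterMap_congr (fun k _ => ?_)
  have h2 : 2 * (k + 1) = 2 * k + 1 + 1 := by ring
  rw [h2, List.getElem?_cons_succ]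

-- B's negative index: dogs[-1] on x :: y :: r is dogs[-1] on r when r is nonempty
lemma pyGetD_neg_one_cons2 (x y : String) (r : List String) (h : r ≠ []) :
    PySem.List.pyGetD (x :: y :: r) (-1) "" = PySem.List.pyGetD r (-1) "" := by
  rw [PySem.List.pyGetD_neg_one _ _ (by simp), PySem.List.pyGetD_neg_one _ _ h]
  rw [List.getLast_cons (by simp), List.getLast_cons h]

-- B's unfolding on the three shapes of the two-step recursion
lemma alt_nil : match_play_partners_alt [] = ([], []) := by decide

lemma alt_one (x : String) : match_play_partners_alt [x] = ([], [x]) := by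
  unfold match_play_partners_alt
  rw [slice?_evens, slice?_odds]
  rw [PySem.List.pyGetD_neg_one _ _ (by simp)]
  simp

lemma alt_cons2 (x y : String) (r : List String) :
    match_play_partners_alt (x :: y :: r)
      = ((x, y) :: (match_play_partners_alt r).1, (match_play_partners_alt r).2) := by
  unfold match_play_partners_alt
  rw [evens_cons2, odds_cons2]
  have hpar : (x :: y :: r).length % 2 = r.length % 2 := by
    simp only [List.length_cons]; omega
  simp only [List.zip_cons_cons, hpar]
  by_cases hodd : r.length % 2 = 1
  · have hne : r ≠ [] := by intro hc; rw [hc] at hodd; simp at hodd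
    rw [if_pos hodd, if_pos hodd, pyGetD_neg_one_cons2 x y r hne]
  · rw [if_neg hodd, if_neg hodd]

-- A-side: range(0, n+2, 2) is 0 followed by range(0, n, 2) shifted by 2
lemma range2_cons (n : Nat) :
    PySem.List.pyRange 0 ((n : Int) + 2) 2 = 0 :: (PySem.List.pyRange 0 (n : Int) 2).map (· + 2) := by
  cases n with
  | zero => rfl
  | succ m =>
    rw [PySem.List.pyRange_of_pos 0 _ (by norm_num), PySem.List.pyRange_of_pos 0 _ (by norm_num)]
    rw [if_pos (by push_cast; omega), if_pos (by push_cast; omega)]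
    have hc : ((((m : Nat) + 1 : Nat) : Int) + 2 - 0 + 2 - 1) / 2
        = ((((m : Nat) + 1 : Nat) : Int) - 0 + 2 - 1) / 2 + 1 := by push_cast; omega
    rw [hc]
    rw [show ((((m : Nat) + 1 : Nat) : Int) - 0 + 2 - 1) / 2 + 1
        = ((((((m : Nat) + 1 : Nat) : Int) - 0 + 2 - 1) / 2).toNat + 1 : Nat) by omega]
    rw [Int.toNat_natCast, List.range_succ_eq_map]
    simp only [List.map_cons, List.map_map]
    congr 1

-- A-side: shifting the loop index by 2 on x :: y :: rest is the loop body on rest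
lemma stepA_shift (x y : String) (rest : List String) (st : List (String × String) × List String)
    (i : Int) (hi : 0 ≤ i) :
    pvStepA (x :: y :: rest) st (i + 2) = pvStepA rest st i := by
  have h2 : ∀ j : Int, 0 ≤ j →
      PySem.List.pyGetD (x :: y :: rest) (j + 2) "" = PySem.List.pyGetD rest j "" := by
    intro j hj
    rw [PySem.List.pyGetD_of_nonneg _ _ (by omega : (0:Int) ≤ j + 2),
      PySem.List.pyGetD_of_nonneg _ _ hj]
    have h : (j + 2).toNat = j.toNat + 2 := by omega
    simp [h]
  have hlen : ((x :: y :: rest).length : Int) = (rest.length : Int) + 2 := by push_cast [List.length]; ring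
  unfold pvStepA
  rw [hlen]
  by_cases h : i + 1 < (rest.length : Int)
  · rw [if_pos (by omega), if_pos h, h2 i hi, show i + 2 + 1 = (i + 1) + 2 by ring, h2 (i + 1) (by omega)]
  · rw [if_neg (by omega), if_neg h, h2 i hi]

-- A-side: a fold whose step only appends to both components factors over the accumulator
lemma foldl_acc_general {γ δ : Type} (f : (List γ × List δ) → Int → (List γ × List δ))
    (hf : ∀ st i, f st i = (st.1 ++ (f ([], []) i).1, st.2 ++ (f ([], []) i).2)) :
    ∀ (l : List Int) (p : List γ) (u : List δ),
      l.foldl f (p, u) = (p ++ (l.foldl f ([], [])).1, u ++ (l.foldl f ([], [])).2) := by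
  intro l
  induction l with
  | nil => simp
  | cons i l ih =>
    intro p u
    obtain ⟨A, B, hAB⟩ : ∃ A B, f ([], []) i = (A, B) := ⟨_, _, rfl⟩
    simp only [List.foldl_cons]
    rw [hf (p, u) i, hAB]
    simp only
    rw [ih, ih A B]
    simp [List.append_assoc]

-- A-side: A's loop body only appends
lemma stepA_appends (dogs : List String) :
    ∀ st i, pvStepA dogs st i = (st.1 ++ (pvStepA dogs ([], []) i).1, st.2 ++ (pvStepA dogs ([], []) i).2) := by
  intro st i
  unfold pvStepA
  split_ifs <;> simp

lemma key : ∀ dogs : List String, match_play_partners dogs = match_play_partners_alt dogs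
  | [] => by rw [alt_nil]; rfl
  | [x] => by
    rw [alt_one]
    unfold match_play_partners
    simp only [List.length_singleton]
    rw [show PySem.List.pyRange 0 ((1 : Nat) : Int) 2 = [0] by decide]
    simp only [List.foldl_cons, List.foldl_nil]
    unfold pvStepA
    rw [if_neg (by norm_num)]
    rw [PySem.List.pyGetD_of_nonneg _ _ (by norm_num : (0:Int) ≤ 0)]
    rfl
  | x :: y :: rest => by
    have ih := key rest
    rw [alt_cons2]
    unfold match_play_partners
    have hlen : (((x :: y :: rest).length : Nat) : Int) = (rest.length : Int) + 2 := by
      push_cast [List.length]; ring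
    rw [hlen, range2_cons, List.foldl_cons]
    have hinit : pvStepA (x :: y :: rest) ([], []) 0 = ([(x, y)], []) := by
      unfold pvStepA
      rw [if_pos (by push_cast; omega)]
      rw [PySem.List.pyGetD_of_nonneg _ _ (by norm_num : (0:Int) ≤ 0),
        PySem.List.pyGetD_of_nonneg _ _ (by norm_num : (0:Int) ≤ 0 + 1)]
      rfl
    rw [hinit, List.foldl_map]
    rw [PySem.List.foldl_congr_mem _ _ (pvStepA rest) _ (by
      intro acc i hi
      have hm := (PySem.List.mem_pyRange_iff_of_pos (by norm_num) i).mp hi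
      exact stepA_shift x y rest acc i hm.1)]
    rw [foldl_acc_general (pvStepA rest) (stepA_appends rest)]
    have hA : (PySem.List.pyRange 0 ((rest.length : Nat) : Int) 2).foldl (pvStepA rest) ([], [])
        = match_play_partners rest := rfl
    rw [hA, ih]
    simp

-- ===== VERDICT (by name: the statement is the Claim_ definition above) =====
theorem match_play_partners_spec : Claim_equal_match_play_partners := by
  intro dogs _
  unfold Spec_match_play_partners
  exact key dogs
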